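-- pv_equiv track=rewrite | github.com/Cpraveen2002/machine-translation | indexer.py | tokens_of_word
-- ===== SOURCE A (Python) =====
-- special_chars = [".", "•", "'", '"', "।", "|", "।", "!", "(", ")", ",", "&", "@", "-", "“", "”", "—", "-", ":", ";", "‘", "’", "\xa0", "\u200c", "\u200d", "\n"]
--
-- def tokens_of_word(word):
--     word = word.lower()
--     for char in special_chars:
--         word = word.replace(char, " ")
--     return_words = []
--     for split in word.split(" "):
--         # try:
--         #     if split[-2:] == "’s" or split[-2:] == "'s":
--         #         split = split[:-1]
--         # except:
--         #     split = split
--         if split == "" or split == " ":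
--             continue
--         # if split in stop_list:
--         #     continue
--         return_words.append(split)
--     return return_words
-- ===== SOURCE B (Python) =====
-- special_chars = [".", "•", "'", '"', "।", "|", "।", "!", "(", ")", ",", "&", "@", "-", "“", "”", "—", "-", ":", ";", "‘", "’", "\xa0", "\u200c", "\u200d", "\n"]
--
-- def tokens_of_word(word):
--     delims = special_chars + [" "]
--     tokens = []
--     buf = []
--     for ch in word.lower():
--         if ch in delims:
--             if buf:
--                 tokens.append("".join(buf))
--                 buf = []
--         else:
--             buf.append(ch)
--     if buf:
--         tokens.append("".join(buf))
--     return tokens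
-- ===== Notes on version B (the rewrite author's own statement) =====
-- stated objective: simpler
-- what changed: Replaced the 26 sequential str.replace passes plus split-and-filter with a single pass over word.lower() that maintains a token buffer and flushes it at each delimiter (the special chars plus the space).
import Mathlib
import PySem

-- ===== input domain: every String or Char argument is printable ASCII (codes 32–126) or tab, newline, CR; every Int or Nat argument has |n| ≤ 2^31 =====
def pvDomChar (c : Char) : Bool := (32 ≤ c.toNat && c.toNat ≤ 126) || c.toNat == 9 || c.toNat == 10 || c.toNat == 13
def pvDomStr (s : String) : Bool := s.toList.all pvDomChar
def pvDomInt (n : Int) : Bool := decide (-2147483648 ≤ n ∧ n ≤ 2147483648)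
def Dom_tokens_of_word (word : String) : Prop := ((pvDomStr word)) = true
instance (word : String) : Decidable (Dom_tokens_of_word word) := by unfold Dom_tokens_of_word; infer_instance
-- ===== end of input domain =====

-- B replaces A's 26 sequential str.replace passes plus split-and-filter by a single buffered scan over word.lower(); objective: simpler (no speed claim).

-- ===== PORT A =====
def pvSpecialChars : List String := [".", "•", "'", "\"", "।", "|", "।", "!", "(", ")", ",", "&", "@", "-", "“", "”", "—", "-", ":", ";", "‘", "’", "\u00A0", "\u200C", "\u200D", "\n"]

-- word.split(" ") with nonempty separator never raises, so Str.split? is `some` here; the getD default is never used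
def tokens_of_word (word : String) : List String :=
  let w1 := PySem.Str.lower word
  let w2 := pvSpecialChars.foldl (fun w ch => PySem.Str.replace w ch " ") w1
  ((PySem.Str.split? w2 " ").getD []).foldl
    (fun acc s => if s = "" ∨ s = " " then acc else acc ++ [s]) []

-- ===== PORT B =====
-- Source B's delimiter list: the special chars (each a 1-char string, ported as Char) plus the space
def pvDelims : List Char := ['.', '•', '\'', '"', '।', '|', '।', '!', '(', ')', ',', '&', '@', '-', '“', '”', '—', '-', ':', ';', '‘', '’', '\u00A0', '\u200C', '\u200D', '\n'] ++ [' ']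

-- loop body of Source B: flush the buffer at a delimiter, else extend it
def pvStep (st : List String × List Char) (c : Char) : List String × List Char :=
  if c ∈ pvDelims then (if st.2 = [] then st else (st.1 ++ [String.ofList st.2], []))
  else (st.1, st.2 ++ [c])

-- the final flush of a non-empty buffer
def pvFlush (st : List String × List Char) : List String :=
  if st.2 = [] then st.1 else st.1 ++ [String.ofList st.2]

def tokens_of_word_alt (word : String) : List String :=
  pvFlush ((PySem.Str.lower word).toList.foldl pvStep ([], []))

-- ===== PRECONDITION & SPEC =====
def Spec_tokens_of_word (word : String) (out : List String) : Prop := out = tokens_of_word_alt word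
instance (word : String) (out : List String) : Decidable (Spec_tokens_of_word word out) := by unfold Spec_tokens_of_word; infer_instance

-- ===== CLAIM (what is proved, stated in full; the proofs are below) =====
def Claim_equal_tokens_of_word : Prop := ∀ (word : String), Dom_tokens_of_word word → Spec_tokens_of_word word (tokens_of_word word)

-- ===== LEMMAS AND PROOFS =====

-- the 26 special characters as chars (each of A's special strings is one char)
def pvSpecials : List Char := ['.', '•', '\'', '"', '।', '|', '।', '!', '(', ')', ',', '&', '@', '-', '“', '”', '—', '-', ':', ';', '‘', '’', '\u00A0', '\u200C', '\u200D', '\n']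

-- the combined effect of A's 26 replaces on one char
def pvRep (x : Char) : Char := if x ∈ pvSpecials then ' ' else x

-- reference splitter: Python's s.split(" ") at char level
def splitSp (buf : List Char) : List Char → List (List Char)
  | [] => [buf]
  | c :: t => if c = ' ' then buf :: splitSp [] t else splitSp (buf ++ [c]) t

lemma pvSpecialChars_eq : pvSpecialChars = pvSpecials.map (fun c => String.ofList [c]) := by decide

lemma pvDelims_eq : pvDelims = pvSpecials ++ [' '] := rfl

lemma space_not_special : ' ' ∉ pvSpecials := by decide

lemma replace_go_single (c : Char) : ∀ (fuel : Nat) (l acc : List Char), l.length ≤ fuel →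
    PySem.Chars.replace.go [c] [' '] fuel l acc =
      acc.reverse ++ l.map (fun x => if x = c then ' ' else x) := by
  intro fuel
  induction fuel with
  | zero =>
    intro l acc h
    have : l = [] := List.length_eq_zero_iff.mp (Nat.le_zero.mp h)
    subst this; rw [PySem.Chars.replace.go]; simp
  | succ n ih =>
    intro l acc h
    cases l with
    | nil => rw [PySem.Chars.replace.go]; simp; omega
    | cons x t =>
      rw [PySem.Chars.replace.go]
      simp only [List.isPrefixOf, Bool.and_true]
      by_cases hx : c = x
      · subst hx
        simp only [beq_self_eq_true, if_true, List.length_cons, List.length_nil, Nat.zero_add,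
          List.drop_succ_cons, List.drop_zero]
        rw [ih t _ (by simpa using h)]
        simp
      · have hbe : (c == x) = false := by simp [hx]
        simp only [hbe, Bool.false_eq_true, if_false]
        rw [ih t _ (by simpa using h)]
        simp [Ne.symm hx]

lemma replace_single (c : Char) (l : List Char) :
    PySem.Chars.replace l [c] [' '] = l.map (fun x => if x = c then ' ' else x) := by
  rw [PySem.Chars.replace]
  simp [replace_go_single c l.length l [] (le_refl _)]

lemma fold_replace_chars : ∀ (cs : List Char) (s : List Char), ' ' ∉ cs →
    cs.foldl (fun w c => PySem.Chars.replace w [c] [' ']) s =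
      s.map (fun x => if x ∈ cs then ' ' else x) := by
  intro cs
  induction cs with
  | nil => intro s _; simp
  | cons c cs ih =>
    intro s hs
    rw [List.foldl_cons, replace_single]
    rw [ih _ (by simp_all), List.map_map]
    refine List.map_congr_left ?_
    intro x _
    simp only [Function.comp]
    by_cases hx : x = c
    · subst hx
      have h1 : ' ' ∉ cs := by simp_all
      simp [h1]
    · simp [hx]

lemma splitOn_go_space : ∀ (fuel : Nat) (l cur : List Char) (acc : List (List Char)), l.length < fuel →
    PySem.Chars.splitOn.go [' '] fuel l cur acc = acc.reverse ++ splitSp cur.reverse l := by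
  intro fuel
  induction fuel with
  | zero => intro l cur acc h; omega
  | succ n ih =>
    intro l cur acc h
    cases l with
    | nil => rw [PySem.Chars.splitOn.go]; simp [splitSp]; omega
    | cons x t =>
      rw [PySem.Chars.splitOn.go]
      simp only [List.isPrefixOf, Bool.and_true]
      by_cases hx : ' ' = x
      · subst hx
        simp only [beq_self_eq_true, if_true, List.length_cons, List.length_nil, Nat.zero_add,
          List.drop_succ_cons, List.drop_zero]
        rw [ih t _ _ (by simpa using h)]
        simp [splitSp]
      · have hbe : (' ' == x) = false := by simp [hx]
        simp only [hbe, Bool.false_eq_true, if_false]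
        rw [ih t _ _ (by simpa using h)]
        simp [splitSp, Ne.symm hx]

lemma splitOn_space (s : List Char) : PySem.Chars.splitOn s [' '] = splitSp [] s := by
  rw [PySem.Chars.splitOn]
  rw [splitOn_go_space (s.length + 1) s [] [] (by omega)]
  simp

lemma splitSp_no_space : ∀ (cs buf : List Char), ' ' ∉ buf → ∀ p ∈ splitSp buf cs, ' ' ∉ p := by
  intro cs
  induction cs with
  | nil => intro buf hb p hp; simp [splitSp] at hp; subst hp; exact hb
  | cons c t ih =>
    intro buf hb p hp
    by_cases hc : c = ' '
    · subst hc; simp [splitSp] at hp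
      rcases hp with h | h
      · subst h; exact hb
      · exact ih [] (by simp) p h
    · simp [splitSp, hc] at hp
      exact ih (buf ++ [c]) (by simp [hb]; exact Ne.symm hc) p hp

lemma fold_str_toList : ∀ (cs : List Char) (w : String),
    (cs.foldl (fun w c => PySem.Str.replace w (String.ofList [c]) " ") w).toList =
      cs.foldl (fun l c => PySem.Chars.replace l [c] [' ']) w.toList := by
  intro cs
  induction cs with
  | nil => intro w; rfl
  | cons c cs ih =>
    intro w
    have hsep : (" " : String).toList = [' '] := rfl
    rw [List.foldl_cons, List.foldl_cons, ih, PySem.Str.toList_replace, String.toList_ofList, hsep]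

lemma split_str (s : String) :
    (PySem.Str.split? s " ").getD [] = (PySem.Chars.splitOn s.toList [' ']).map String.ofList := by
  have h := PySem.Str.split?_map s " "
  cases hs : PySem.Str.split? s " " with
  | none => rw [hs] at h; simp [PySem.Chars.split?] at h
  | some ps =>
    rw [hs] at h
    have hsep : (" " : String).toList = [' '] := rfl
    rw [hsep] at h
    simp only [PySem.Chars.split?, List.isEmpty_cons, Bool.false_eq_true, if_false,
      Option.map_some, Option.some.injEq] at h
    simp [← h, List.map_map, Function.comp_def]

lemma main_fold : ∀ (L : List Char) (toks : List String) (buf : List Char),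
    pvFlush (L.foldl pvStep (toks, buf)) =
      toks ++ ((splitSp buf (L.map pvRep)).filter (fun p => !p.isEmpty)).map String.ofList := by
  intro L
  induction L with
  | nil =>
    intro toks buf
    by_cases hb : buf = [] <;> simp [pvFlush, splitSp, hb]
  | cons c t ih =>
    intro toks buf
    rw [List.foldl_cons]
    by_cases hc : c ∈ pvDelims
    · have hf : pvRep c = ' ' := by
        rw [pvDelims_eq] at hc
        rcases List.mem_append.mp hc with h | h
        · simp [pvRep, h]
        · simp at h; subst h; simp [pvRep, space_not_special]
      by_cases hb : buf = []
      · subst hb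
        simp only [pvStep, hc, if_true]
        rw [ih]
        simp [splitSp, hf]
      · simp only [pvStep, hc, if_true, if_neg hb]
        rw [ih]
        simp [splitSp, hf, hb]
    · have hcs : c ∉ pvSpecials := fun h => hc (by rw [pvDelims_eq]; exact List.mem_append_left _ h)
      have hsp : c ≠ ' ' := fun h => hc (by rw [pvDelims_eq, h]; simp)
      simp only [pvStep, hc, if_false]
      rw [ih]
      simp [splitSp, pvRep, hcs, hsp]

lemma a_side (word : String) :
    tokens_of_word word =
      ((splitSp [] ((PySem.Str.lower word).toList.map pvRep)).filter (fun p => !p.isEmpty)).map String.ofList := by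
  unfold tokens_of_word
  have hshape : (fun (acc : List String) s => if s = "" ∨ s = " " then acc else acc ++ [s]) =
      (fun (acc : List String) s =>
        if (!(decide (s = "") || decide (s = " "))) = true then acc ++ [id s] else acc) := by
    funext acc s
    by_cases h1 : s = "" <;> by_cases h2 : s = " " <;> simp [h1, h2]
  rw [hshape, PySem.List.foldl_append_if]
  have hrep : (pvSpecialChars.foldl (fun w ch => PySem.Str.replace w ch " ") (PySem.Str.lower word)).toList =
      (PySem.Str.lower word).toList.map pvRep := by
    rw [pvSpecialChars_eq, List.foldl_map, fold_str_toList, fold_replace_chars _ _ space_not_special]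
    rfl
  rw [split_str, hrep, splitOn_space, List.nil_append, List.map_id, List.filter_map]
  refine congrArg (List.map String.ofList) ?_
  apply List.filter_congr
  intro p hp
  have hnsp : ' ' ∉ p :=
    splitSp_no_space ((PySem.Str.lower word).toList.map pvRep) [] (by simp) p hp
  simp only [Function.comp]
  cases p with
  | nil => simp
  | cons x xs =>
    have hx : x ≠ ' ' := fun h => hnsp (by rw [h]; simp)
    have h1 : String.ofList (x :: xs) ≠ "" := by
      intro h; have := congrArg String.toList h; simp at this
    have h2 : String.ofList (x :: xs) ≠ " " := by
      intro h; have := congrArg String.toList h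
      rw [String.toList_ofList] at this
      have : x = ' ' := by
        have := congrArg (fun l => l.head?) this
        simpa using this
      exact hx this
    simp [h1, h2]

-- ===== VERDICT (by name: the statement is the Claim_ definition above) =====
theorem tokens_of_word_spec : Claim_equal_tokens_of_word := by
  intro word _
  unfold Spec_tokens_of_word tokens_of_word_alt
  rw [a_side, main_fold]
  exact (List.nil_append _).symm
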